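-- pv_equiv track=rewrite | github.com/huangqiank/Algorithm | leetcode/sliding_window/moving_stones_until_consecutive2.py | numMovesStonesII
-- ===== SOURCE A (Python) =====
-- def numMovesStonesII(stones):
--     stones = sorted(stones)
--     n = len(stones)
--     max_step = max(stones[n - 1] - stones[1] + 1 - (n - 1), stones[n - 2] - stones[0] - 1 - (n - 3))
--     i = 0
--     min_step = float("inf")
--     for j in range(len(stones)):
--         while stones[j] - stones[i] >= n:
--             i += 1
--         if j - i + 1 == n - 1 and stones[j] - stones[i] + 1 == n - 1:
--             ##-1567
--             ##-1356
--             ##3456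
--             ##如果只用走一步，则这么做，其他情况需要n - (j - i + 1)
--             min_step = min(min_step, 2)
--         else:
--             min_step = min(min_step, n - (j - i + 1))
--     return [min_step, max_step]
-- ===== SOURCE B (Python) =====
-- def _bisect_left(a, x):
--     lo, hi = 0, len(a)
--     while lo < hi:
--         mid = (lo + hi) // 2
--         if a[mid] < x:
--             lo = mid + 1
--         else:
--             hi = mid
--     return lo
--
--
-- def _window_cost(s, n, j):
--     # smallest i with s[j] - s[i] <= n - 1, found by binary search
--     i = _bisect_left(s, s[j] - n + 1)
--     k = j - i + 1
--     if k == n - 1 and s[j] - s[i] == n - 2: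
--         return 2
--     return n - k
--
--
-- def numMovesStonesII(stones):
--     s = sorted(stones)
--     n = len(s)
--     max_step = max(s[n - 1] - s[1] + 1 - (n - 1), s[n - 2] - s[0] - 1 - (n - 3))
--     min_step = min(map(lambda j: _window_cost(s, n, j), range(n)))
--     return [min_step, max_step]
-- ===== Notes on version B (the rewrite author's own statement) =====
-- stated objective: alternative
-- what changed: A's stateful two-pointer sliding window (carrying the left index i across iterations of j, with a float('inf') running minimum) is replaced by an independent hand-rolled bisect_left binary search per right endpoint j that finds the maximal window directly, and the minimum is taken with min() over a map of per-window costs; Pre_ excludes lists of length < 2, on which A raises IndexError.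
import Mathlib
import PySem

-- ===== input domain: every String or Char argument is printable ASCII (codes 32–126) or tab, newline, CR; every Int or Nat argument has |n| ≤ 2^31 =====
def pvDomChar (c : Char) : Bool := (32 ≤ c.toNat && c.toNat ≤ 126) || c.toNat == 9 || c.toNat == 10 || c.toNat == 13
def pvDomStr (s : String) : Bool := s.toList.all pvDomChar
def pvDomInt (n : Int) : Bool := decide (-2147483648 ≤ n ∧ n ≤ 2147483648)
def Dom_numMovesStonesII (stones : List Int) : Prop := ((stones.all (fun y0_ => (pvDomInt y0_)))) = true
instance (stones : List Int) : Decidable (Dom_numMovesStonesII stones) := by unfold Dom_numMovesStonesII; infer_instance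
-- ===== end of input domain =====

-- B replaces A's stateful two-pointer sliding window by an independent binary search per
-- right endpoint and a min over mapped window costs (objective: alternative, not faster).

-- ===== PORT A =====
-- the inner `while stones[j] - stones[i] >= n: i += 1`; fuel (s.length suffices: i never
-- passes j) only makes the recursion total, indices stay in range wherever Python's do
def pvAdvance (s : List Int) (nI sj : Int) : Nat → Nat → Nat
  | 0, i => i
  | fuel+1, i => if nI ≤ sj - s.getD i 0 then pvAdvance s nI sj fuel (i+1) else i

-- one iteration of A's `for j in range(len(stones))` loop; state = (i, min_step),
-- min_step : Option Int with none = float("inf") (A's branches kept in order)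
def pvStepA (s : List Int) (st : Nat × Option Int) (j : Nat) : Nat × Option Int :=
  let i := pvAdvance s (s.length : Int) (s.getD j 0) s.length st.1
  if (j : Int) - (i : Int) + 1 = (s.length : Int) - 1 ∧
      s.getD j 0 - s.getD i 0 + 1 = (s.length : Int) - 1 then
    (i, some (match st.2 with | none => (2 : Int) | some m => min m 2))
  else
    (i, some (match st.2 with
              | none => (s.length : Int) - ((j : Int) - (i : Int) + 1)
              | some m => min m ((s.length : Int) - ((j : Int) - (i : Int) + 1))))

-- getD is exact for the in-range nonnegative indices Python uses here (n ≥ 2 under Pre_)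
def numMovesStonesII (stones : List Int) : List Int :=
  let s := PySem.List.sorted stones (fun x => x) false
  let n := s.length
  let maxStep := max (s.getD (n-1) 0 - s.getD 1 0 + 1 - ((n : Int) - 1))
                     (s.getD (n-2) 0 - s.getD 0 0 - 1 - ((n : Int) - 3))
  let res := (List.range n).foldl (pvStepA s) (0, none)
  match res.2 with
  | some m => [m, maxStep]
  | none => []  -- unreachable under Pre_: Python raises IndexError when len < 2

-- ===== PORT B =====
-- Source B's hand-rolled _bisect_left (binary search); a[mid] is always in range when lo < hi ≤ len
def pvBisectLeft (s : List Int) (x : Int) (lo hi : Nat) : Nat :=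
  if _h : lo < hi then
    if s.getD ((lo + hi) / 2) 0 < x then pvBisectLeft s x ((lo + hi) / 2 + 1) hi
    else pvBisectLeft s x lo ((lo + hi) / 2)
  else lo
termination_by hi - lo
decreasing_by all_goals omega

-- Source B's _window_cost
def pvWindowCost (s : List Int) (n : Nat) (j : Nat) : Int :=
  let i := pvBisectLeft s (s.getD j 0 - (n : Int) + 1) 0 s.length
  let k : Int := (j : Int) - (i : Int) + 1
  if k = (n : Int) - 1 ∧ s.getD j 0 - s.getD i 0 = (n : Int) - 2 then 2 else (n : Int) - k

def numMovesStonesII_alt (stones : List Int) : List Int :=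
  let s := PySem.List.sorted stones (fun x => x) false
  let n := s.length
  let maxStep := max (s.getD (n-1) 0 - s.getD 1 0 + 1 - ((n : Int) - 1))
                     (s.getD (n-2) 0 - s.getD 0 0 - 1 - ((n : Int) - 3))
  match PySem.List.min? ((List.range n).map (pvWindowCost s n)) (fun y => y) with
  | some m => [m, maxStep]
  | none => []  -- unreachable under Pre_: Python's min raises on an empty sequence

-- ===== PRECONDITION & SPEC =====
-- Pre_ excludes lists of length < 2, on which A raises IndexError (stones[1] / stones[-1])
def Pre_numMovesStonesII (stones : List Int) : Prop := 2 ≤ stones.length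
instance (stones : List Int) : Decidable (Pre_numMovesStonesII stones) := by
  unfold Pre_numMovesStonesII; infer_instance
def pvWitness_numMovesStonesII : List Int := [1, 3, 5]

def Spec_numMovesStonesII (stones : List Int) (out : List Int) : Prop := out = numMovesStonesII_alt stones
instance (stones : List Int) (out : List Int) : Decidable (Spec_numMovesStonesII stones out) := by
  unfold Spec_numMovesStonesII; infer_instance

-- ===== CLAIM (what is proved, stated in full; the proofs are below) =====
def Claim_equal_numMovesStonesII : Prop := ∀ (stones : List Int), Dom_numMovesStonesII stones → Pre_numMovesStonesII stones → Spec_numMovesStonesII stones (numMovesStonesII stones)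

-- ===== LEMMAS AND PROOFS =====

-- A's running minimum as an Option-valued fold (none = inf)
def pvRunMin (l : List Int) : Option Int :=
  l.foldl (fun o c => some (match o with | none => c | some m => min m c)) none

-- B's left boundary for right endpoint j
def pvI (s : List Int) (j : Nat) : Nat :=
  pvBisectLeft s (s.getD j 0 - (s.length : Int) + 1) 0 s.length

theorem pvMono (s : List Int) (hs : s.Pairwise (· ≤ ·)) {a b : Nat}
    (hab : a ≤ b) (hb : b < s.length) : s.getD a 0 ≤ s.getD b 0 := by
  rcases Nat.lt_or_ge a b with h | h
  · have ha : a < s.length := lt_trans h hb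
    have := (List.pairwise_iff_getElem.mp hs) a b ha hb h
    simpa [List.getD, List.getElem?_eq_getElem, ha, hb] using this
  · have : a = b := le_antisymm hab h
    subst this; rfl

theorem pvBisectLeft_spec (s : List Int) (x : Int) (hs : s.Pairwise (· ≤ ·)) :
    ∀ d lo hi, hi - lo ≤ d → lo ≤ hi → hi ≤ s.length →
    (∀ t, t < lo → s.getD t 0 < x) →
    (∀ t, hi ≤ t → t < s.length → x ≤ s.getD t 0) →
    (∀ t, t < pvBisectLeft s x lo hi → s.getD t 0 < x) ∧
    (∀ t, pvBisectLeft s x lo hi ≤ t → t < s.length → x ≤ s.getD t 0) ∧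
    lo ≤ pvBisectLeft s x lo hi ∧ pvBisectLeft s x lo hi ≤ hi := by
  intro d
  induction d with
  | zero =>
    intro lo hi hd hlohi hhis hlo hhi
    have : lo = hi := by omega
    subst this
    rw [pvBisectLeft]
    simp only [lt_irrefl, dite_false]
    exact ⟨hlo, fun t ht1 ht2 => hhi t ht1 ht2, le_refl _, le_refl _⟩
  | succ d ih =>
    intro lo hi hd hlohi hhis hlo hhi
    rw [pvBisectLeft]
    by_cases h : lo < hi
    · simp only [h, dite_true]
      by_cases hc : s.getD ((lo + hi) / 2) 0 < x
      · simp only [hc, if_true]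
        obtain ⟨a1, a2, a3, a4⟩ := ih ((lo + hi) / 2 + 1) hi (by omega) (by omega) hhis
          (fun t ht => lt_of_le_of_lt (pvMono s hs (by omega) (by omega)) hc) hhi
        exact ⟨a1, a2, by omega, a4⟩
      · simp only [hc, if_false]
        obtain ⟨a1, a2, a3, a4⟩ := ih lo ((lo + hi) / 2) (by omega) (by omega) (by omega) hlo
          (fun t ht1 ht2 => le_trans (not_lt.mp hc) (pvMono s hs ht1 ht2))
        exact ⟨a1, a2, a3, by omega⟩
    · simp only [h, dite_false]
      have : lo = hi := by omega
      subst this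
      exact ⟨hlo, fun t ht1 ht2 => hhi t ht1 ht2, le_refl _, le_refl _⟩

-- package of facts about pvI
theorem pvI_facts (s : List Int) (hs : s.Pairwise (· ≤ ·)) (j : Nat) (hj : j < s.length) :
    (∀ t, t < pvI s j → s.getD t 0 < s.getD j 0 - (s.length : Int) + 1) ∧
    (∀ t, pvI s j ≤ t → t < s.length → s.getD j 0 - (s.length : Int) + 1 ≤ s.getD t 0) ∧
    pvI s j ≤ j := by
  have h := pvBisectLeft_spec s (s.getD j 0 - (s.length : Int) + 1) hs s.length 0 s.length
    (by omega) (by omega) (le_refl _) (by omega) (by omega)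
  obtain ⟨h1, h2, _, _⟩ := h
  refine ⟨h1, h2, ?_⟩
  unfold pvI
  by_contra hlt
  have hx := h1 j (by omega)
  have hlen : (1 : Int) ≤ (s.length : Int) := by exact_mod_cast Nat.one_le_iff_ne_zero.mpr (by omega)
  omega

theorem pvI_mono (s : List Int) (hs : s.Pairwise (· ≤ ·)) (j : Nat) (hj : j + 1 < s.length) :
    pvI s j ≤ pvI s (j + 1) := by
  obtain ⟨h1, _, _⟩ := pvI_facts s hs j (by omega)
  obtain ⟨_, h2', h3'⟩ := pvI_facts s hs (j+1) hj
  by_contra hlt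
  have hlt' : pvI s (j+1) < pvI s j := by omega
  have ht1 := h1 (pvI s (j+1)) hlt'
  have ht2 := h2' (pvI s (j+1)) (le_refl _) (by
    obtain ⟨_, _, h3⟩ := pvI_facts s hs j (by omega); omega)
  have hmono : s.getD j 0 ≤ s.getD (j+1) 0 := pvMono s hs (by omega) hj
  omega

theorem pvAdvance_eq (s : List Int) (nI sj : Int) (r : Nat) :
    ∀ (fuel i0 : Nat), i0 ≤ r → r ≤ i0 + fuel →
    (∀ t, i0 ≤ t → t < r → nI ≤ sj - s.getD t 0) →
    ¬ nI ≤ sj - s.getD r 0 →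
    pvAdvance s nI sj fuel i0 = r := by
  intro fuel
  induction fuel with
  | zero =>
    intro i0 h1 h2 _ _
    have : i0 = r := by omega
    simpa [pvAdvance] using this
  | succ f ih =>
    intro i0 h1 h2 hlow hstop
    rw [pvAdvance]
    by_cases hc : nI ≤ sj - s.getD i0 0
    · have hner : i0 ≠ r := fun he => hstop (he ▸ hc)
      simp only [hc, if_true]
      exact ih (i0+1) (by omega) (by omega) (fun t ht1 ht2 => hlow t (by omega) ht2) hstop
    · simp only [hc, if_false]
      by_contra hne
      exact hc (hlow i0 (le_refl _) (by omega))

-- the advance from any earlier start lands exactly on B's binary-search boundary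
theorem pvAdvance_eq_pvI (s : List Int) (hs : s.Pairwise (· ≤ ·)) (j i0 : Nat)
    (hj : j < s.length) (hi0 : i0 ≤ pvI s j) :
    pvAdvance s (s.length : Int) (s.getD j 0) s.length i0 = pvI s j := by
  obtain ⟨h1, h2, h3⟩ := pvI_facts s hs j hj
  apply pvAdvance_eq
  · exact hi0
  · omega
  · intro t _ ht2
    have := h1 t ht2
    omega
  · have := h2 (pvI s j) (le_refl _) (by omega)
    omega

-- per-endpoint agreement of A's branch values with B's window cost
theorem pvStepA_eq (s : List Int) (hs : s.Pairwise (· ≤ ·)) (j : Nat) (hj : j < s.length)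
    (st : Nat × Option Int) (hst : st.1 ≤ pvI s j) :
    pvStepA s st j =
      (pvI s j, some (match st.2 with
                      | none => pvWindowCost s s.length j
                      | some m => min m (pvWindowCost s s.length j))) := by
  obtain ⟨i0, o⟩ := st
  simp only [pvStepA, pvWindowCost]
  rw [pvAdvance_eq_pvI s hs j i0 hj hst]
  rw [show pvBisectLeft s (s.getD j 0 - (s.length : Int) + 1) 0 s.length = pvI s j from rfl]
  have hiff : ((j : Int) - (pvI s j : Int) + 1 = (s.length : Int) - 1 ∧
      s.getD j 0 - s.getD (pvI s j) 0 + 1 = (s.length : Int) - 1) ↔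
      ((j : Int) - (pvI s j : Int) + 1 = (s.length : Int) - 1 ∧
      s.getD j 0 - s.getD (pvI s j) 0 = (s.length : Int) - 2) :=
    ⟨fun h => ⟨h.1, by omega⟩, fun h => ⟨h.1, by omega⟩⟩
  cases o with
  | none =>
    split_ifs with h1 h2 h3 <;>
      first
        | rfl
        | exact absurd (hiff.mp h1) h2
        | exact absurd (hiff.mpr h3) h1
  | some m =>
    split_ifs with h1 h2 h3 <;>
      first
        | rfl
        | exact absurd (hiff.mp h1) h2
        | exact absurd (hiff.mpr h3) h1

theorem pvRunMin_append (l : List Int) (c : Int) :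
    pvRunMin (l ++ [c]) =
      some (match pvRunMin l with | none => c | some m => min m c) := by
  unfold pvRunMin
  rw [List.foldl_append]
  rfl

-- the main fold invariant: A's loop over range (m+1) carries B's boundary and running min
theorem pvFoldA (s : List Int) (hs : s.Pairwise (· ≤ ·)) :
    ∀ m, m < s.length →
    (List.range (m+1)).foldl (pvStepA s) (0, none) =
      (pvI s m, pvRunMin ((List.range (m+1)).map (pvWindowCost s s.length))) := by
  intro m
  induction m with
  | zero =>
    intro h0
    simp only [List.range_succ, List.range_zero, List.nil_append, List.foldl_cons,
      List.foldl_nil, List.map_cons, List.map_nil]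
    rw [pvStepA_eq s hs 0 h0 (0, none) (by simp)]
    rfl
  | succ m ih =>
    intro hm
    rw [List.range_succ, List.foldl_append, List.map_append, ih (by omega)]
    simp only [List.foldl_cons, List.foldl_nil, List.map_cons, List.map_nil]
    rw [pvStepA_eq s hs (m+1) hm (pvI s m, _) (pvI_mono s hs m hm)]
    rw [pvRunMin_append]

theorem pvRunMin_some (l : List Int) (a : Int) :
    l.foldl (fun o c => some (match o with | none => c | some m => min m c)) (some a)
      = some (l.foldl min a) := by
  induction l generalizing a with
  | nil => rfl
  | cons x t ih => simpa using ih (min a x)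

theorem pvRunMin_eq_min? (l : List Int) :
    pvRunMin l = PySem.List.min? l (fun y => y) := by
  cases l with
  | nil => rfl
  | cons x t =>
    rw [PySem.List.min?_id_cons]
    unfold pvRunMin
    simp only [List.foldl_cons]
    exact pvRunMin_some t x

-- ===== VERDICT (by name: the statement is the Claim_ definition above) =====
theorem numMovesStonesII_spec : Claim_equal_numMovesStonesII := by
  intro stones _ hpre
  unfold Spec_numMovesStonesII numMovesStonesII numMovesStonesII_alt
  simp only []
  set s := PySem.List.sorted stones (fun x => x) false with hsdef
  have hs : s.Pairwise (· ≤ ·) := by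
    simpa using PySem.List.sorted_pairwise (xs := stones) (key := fun x => x)
  have hlen : s.length = stones.length := by
    exact PySem.List.length_sorted stones (fun x => x) false
  have h2 : 2 ≤ s.length := by rw [hlen]; exact hpre
  obtain ⟨m, hm⟩ : ∃ m, s.length = m + 1 := ⟨s.length - 1, by omega⟩
  rw [hm, pvFoldA s hs m (by omega), pvRunMin_eq_min?]
  simp only [hm]
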